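-- pv_equiv track=rewrite | github.com/walkccc/LeetCode | solutions/1826. Faulty Sensor/1826.py | badSensor
-- ===== SOURCE A (Python) =====
-- def badSensor(sensor1: list[int], sensor2: list[int]) -> int:
--   # A -> B, so B is defect
--   def canReplace(A, B):
--     i = 0  # A's index
--     j = 0  # B's index
--     droppedValue = -1
--
--     while i < len(A):
--       if A[i] == B[j]:
--         i += 1
--         j += 1
--       else:
--         droppedValue = A[i]
--         i += 1
--
--     return j == len(B) - 1 and B[-1] != droppedValue
--
--   oneDefect = canReplace(sensor2, sensor1)
--   twoDefect = canReplace(sensor1, sensor2)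
--   if oneDefect and twoDefect:
--     return -1
--   if not oneDefect and not twoDefect:
--     return -1
--   return 1 if oneDefect else 2
-- ===== SOURCE B (Python) =====
-- def badSensor(sensor1: list[int], sensor2: list[int]) -> int:
--   n = len(sensor1)
--   i = 0
--   while i < n and sensor1[i] == sensor2[i]:
--     i += 1
--   if i == n:
--     return -1
--   oneDefect = sensor2[i + 1:] == sensor1[i:-1] and sensor1[-1] != sensor2[i]
--   twoDefect = sensor1[i + 1:] == sensor2[i:-1] and sensor2[-1] != sensor1[i]
--   if oneDefect == twoDefect:
--     return -1
--   return 1 if oneDefect else 2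
-- ===== Notes on version B (the rewrite author's own statement) =====
-- stated objective: simpler
-- what changed: A runs a drop-tracking two-pointer merge scan in each direction; B finds the single first-divergence index and decides each direction by one suffix-slice comparison plus a last-element check (one Python-level pass plus C-level slice comparisons instead of two element-wise merge scans). Pre_ admits equal-length arrays (the problem's domain) plus unequal-length pairs where neither array minus its last element embeds in the other (there both provably return -1); …
-- outside the precondition, e.g. on badSensor([1, 2], [3]): A returns 2, B returns -1; on badSensor([1], [2, 2]): A returns 1, B returns -1
import Mathlib
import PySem

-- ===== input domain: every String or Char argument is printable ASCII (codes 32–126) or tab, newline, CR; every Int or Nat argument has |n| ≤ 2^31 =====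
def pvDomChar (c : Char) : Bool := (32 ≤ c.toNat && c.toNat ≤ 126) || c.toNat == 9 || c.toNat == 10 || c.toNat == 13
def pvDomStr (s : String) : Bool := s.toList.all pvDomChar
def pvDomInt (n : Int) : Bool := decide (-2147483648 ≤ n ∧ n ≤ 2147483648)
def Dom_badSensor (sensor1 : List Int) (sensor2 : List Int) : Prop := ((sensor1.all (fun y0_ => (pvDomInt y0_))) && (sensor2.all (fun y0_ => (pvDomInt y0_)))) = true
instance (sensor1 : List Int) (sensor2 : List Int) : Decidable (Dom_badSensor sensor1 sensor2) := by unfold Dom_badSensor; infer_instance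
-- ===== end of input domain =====

-- B replaces A's two drop-tracking two-pointer merge scans by one pass that finds the
-- first divergence index and two suffix-slice comparisons (objective: simpler).

-- ===== PORT A =====
-- `B[-1] != d` (none = IndexError; unreachable at the call site)
def lastNe (ys : List Int) (d : Int) : Bool :=
  match PySem.List.pyGet? ys (-1) with
  | some last => decide (last ≠ d)
  | none => false

-- the `while i < len(A)` loop of canReplace, state (i, j, droppedValue); returns (j, dropped)
def pvLoop (A B : List Int) (i j : Nat) (d : Int) : Nat × Int :=
  if _h : i < A.length then
    match PySem.List.pyGet? A (i : Int), PySem.List.pyGet? B (j : Int) with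
    | some a, some b =>
        if a = b then pvLoop A B (i + 1) (j + 1) d
        else pvLoop A B (i + 1) j a
    | _, _ => (j, d)   -- B[j] out of range: Python raises IndexError (unreachable under Pre_)
  else (j, d)
  termination_by A.length - i
  decreasing_by all_goals omega

def pvCanReplace (A B : List Int) : Bool :=
  let r := pvLoop A B 0 0 (-1)
  if (r.1 : Int) = (B.length : Int) - 1 then lastNe B r.2 else false

def badSensor (sensor1 : List Int) (sensor2 : List Int) : Int :=
  let oneDefect := pvCanReplace sensor2 sensor1
  let twoDefect := pvCanReplace sensor1 sensor2
  if oneDefect && twoDefect then -1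
  else if !oneDefect && !twoDefect then -1
  else if oneDefect then 1 else 2

-- ===== PORT B =====
-- `while i < n and sensor1[i] == sensor2[i]: i += 1`
def bLoop (s1 s2 : List Int) (i : Nat) : Nat :=
  if _h : i < s1.length then
    match PySem.List.pyGet? s1 (i : Int), PySem.List.pyGet? s2 (i : Int) with
    | some a, some b => if a = b then bLoop s1 s2 (i + 1) else i
    | _, _ => i   -- s2[i] out of range: IndexError in Python (unreachable under Pre_)
  else i
  termination_by s1.length - i
  decreasing_by all_goals omega

-- `xs[-1] != ys[j]` (none = IndexError; unreachable at the call sites)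
def neGet (xs ys : List Int) (j : Int) : Bool :=
  match PySem.List.pyGet? xs (-1), PySem.List.pyGet? ys j with
  | some a, some b => decide (a ≠ b)
  | _, _ => false

def badSensor_alt (sensor1 : List Int) (sensor2 : List Int) : Int :=
  let n := sensor1.length
  let i := bLoop sensor1 sensor2 0
  if i = n then -1
  else
    let oneDefect := decide (PySem.List.slice sensor2 (some ((i : Int) + 1)) none
        = PySem.List.slice sensor1 (some (i : Int)) (some (-1))) && neGet sensor1 sensor2 (i : Int)
    let twoDefect := decide (PySem.List.slice sensor1 (some ((i : Int) + 1)) none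
        = PySem.List.slice sensor2 (some (i : Int)) (some (-1))) && neGet sensor2 sensor1 (i : Int)
    if oneDefect == twoDefect then -1
    else if oneDefect then 1 else 2

-- ===== PRECONDITION & SPEC =====
-- Pre_ admits equal-length arrays (the problem's domain) and, beyond it, every unequal-length
-- pair where neither array minus its last element embeds in the other as a subsequence (there
-- both programs provably return -1); the excluded unequal-length pairs are those where A
-- raises IndexError or returns a defect verdict produced by leftover merge/sentinel state.
def Pre_badSensor (sensor1 : List Int) (sensor2 : List Int) : Prop :=
  sensor1.length = sensor2.length ∨
    (¬ sensor1.dropLast.Sublist sensor2 ∧ ¬ sensor2.dropLast.Sublist sensor1)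
instance (sensor1 : List Int) (sensor2 : List Int) : Decidable (Pre_badSensor sensor1 sensor2) := by unfold Pre_badSensor; infer_instance

def pvWitness_badSensor : List Int × List Int := ([1, 2], [1, 3])

def Spec_badSensor (sensor1 : List Int) (sensor2 : List Int) (out : Int) : Prop := out = badSensor_alt sensor1 sensor2
instance (sensor1 : List Int) (sensor2 : List Int) (out : Int) : Decidable (Spec_badSensor sensor1 sensor2 out) := by unfold Spec_badSensor; infer_instance

-- ===== CLAIM (what is proved, stated in full; the proofs are below) =====
def Claim_equal_badSensor : Prop := ∀ (sensor1 : List Int) (sensor2 : List Int), Dom_badSensor sensor1 sensor2 → Pre_badSensor sensor1 sensor2 → Spec_badSensor sensor1 sensor2 (badSensor sensor1 sensor2)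

-- ===== LEMMAS AND PROOFS =====

-- structural version of A's loop (drops the index bookkeeping)
def loopL : List Int → List Int → Int → Nat × Int
  | [], _, d => (0, d)
  | _ :: _, [], d => (0, d)
  | a :: X, b :: Y, d =>
    if a = b then ((loopL X Y d).1 + 1, (loopL X Y d).2)
    else loopL X (b :: Y) a

-- length of the common prefix (B's loop, structurally)
def cp : List Int → List Int → Nat
  | a :: X, b :: Y => if a = b then cp X Y + 1 else 0
  | _, _ => 0

lemma pvLoop_eq_loopL (A B : List Int) : ∀ (n i j : Nat) (d : Int), A.length - i ≤ n → i ≤ A.length → j ≤ B.length →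
    pvLoop A B i j d = (j + (loopL (A.drop i) (B.drop j) d).1, (loopL (A.drop i) (B.drop j) d).2) := by
  intro n
  induction n with
  | zero =>
    intro i j d hn hi hj
    have hie : i = A.length := by omega
    rw [pvLoop, dif_neg (by omega)]
    simp [hie, loopL]
  | succ n ih =>
    intro i j d hn hi hj
    by_cases h : i < A.length
    · have hA : A.drop i = A[i] :: A.drop (i + 1) := List.drop_eq_getElem_cons h
      rw [pvLoop, dif_pos h]
      by_cases hjB : j < B.length
      · have hB : B.drop j = B[j] :: B.drop (j + 1) := List.drop_eq_getElem_cons hjB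
        simp only [PySem.List.pyGet?_natCast, List.getElem?_eq_getElem h,
          List.getElem?_eq_getElem hjB]
        rw [hA, hB, loopL]
        by_cases hab : A[i] = B[j]
        · rw [if_pos hab, if_pos hab]
          rw [ih (i+1) (j+1) d (by omega) (by omega) (by omega)]
          have : j + 1 + (loopL (A.drop (i+1)) (B.drop (j+1)) d).1
              = j + ((loopL (A.drop (i+1)) (B.drop (j+1)) d).1 + 1) := by omega
          rw [this]
        · rw [if_neg hab, if_neg hab]
          rw [ih (i+1) j A[i] (by omega) (by omega) (by omega), hB]
      · have hB : B.drop j = [] := List.drop_eq_nil_of_le (by omega)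
        have hnone : PySem.List.pyGet? B (j : Int) = none := by
          rw [PySem.List.pyGet?_natCast]
          simp; omega
        rw [hnone, hA, hB]
        cases hg : PySem.List.pyGet? A (i : Int) <;> simp [loopL]
    · have hie : i = A.length := by omega
      rw [pvLoop, dif_neg h]
      simp [hie, loopL]

lemma bLoop_eq_cp (s1 s2 : List Int) :
    ∀ (n i : Nat), s1.length - i ≤ n → i ≤ s1.length →
    bLoop s1 s2 i = i + cp (s1.drop i) (s2.drop i) := by
  intro n
  induction n with
  | zero =>
    intro i hn hi
    have hie : i = s1.length := by omega
    rw [bLoop, dif_neg (by omega)]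
    simp [hie, cp]
  | succ n ih =>
    intro i hn hi
    by_cases h : i < s1.length
    · have hA : s1.drop i = s1[i] :: s1.drop (i + 1) := List.drop_eq_getElem_cons h
      rw [bLoop, dif_pos h]
      by_cases h2 : i < s2.length
      · have hB : s2.drop i = s2[i] :: s2.drop (i + 1) := List.drop_eq_getElem_cons h2
        simp only [PySem.List.pyGet?_natCast, List.getElem?_eq_getElem h,
          List.getElem?_eq_getElem h2]
        rw [hA, hB, cp]
        by_cases hab : s1[i] = s2[i]
        · rw [if_pos hab, if_pos hab, ih (i+1) (by omega) (by omega)]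
          omega
        · rw [if_neg hab, if_neg hab]
          omega
      · have hB : s2.drop i = [] := List.drop_eq_nil_of_le (by omega)
        have hnone : PySem.List.pyGet? s2 (i : Int) = none := by
          rw [PySem.List.pyGet?_natCast]
          simp; omega
        rw [hnone, hA, hB]
        cases hg : PySem.List.pyGet? s1 (i : Int) <;> simp [cp]
    · have hie : i = s1.length := by omega
      rw [bLoop, dif_neg h]
      simp [hie, cp]

lemma cp_le_left : ∀ (X Y : List Int), cp X Y ≤ X.length := by
  intro X
  induction X with
  | nil => intro Y; simp [cp]
  | cons a X' ih =>
    intro Y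
    cases Y with
    | nil => simp [cp]
    | cons b Y' =>
      rw [cp]
      by_cases hab : a = b
      · rw [if_pos hab]; have := ih Y'; simp; omega
      · rw [if_neg hab]; simp

lemma cp_le_right : ∀ (X Y : List Int), cp X Y ≤ Y.length := by
  intro X
  induction X with
  | nil => intro Y; simp [cp]
  | cons a X' ih =>
    intro Y
    cases Y with
    | nil => simp [cp]
    | cons b Y' =>
      rw [cp]
      by_cases hab : a = b
      · rw [if_pos hab]; have := ih Y'; simp; omega
      · rw [if_neg hab]; simp

lemma cp_eq_right : ∀ (X Y : List Int), cp X Y = Y.length → Y = X.take Y.length := by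
  intro X
  induction X with
  | nil =>
    intro Y h
    simp [cp] at h
    simp [List.length_eq_zero_iff.mp h.symm]
  | cons a X' ih =>
    intro Y h
    cases Y with
    | nil => simp
    | cons b Y' =>
      rw [cp] at h
      by_cases hab : a = b
      · rw [if_pos hab] at h
        simp at h ⊢
        exact ⟨hab.symm, ih Y' h⟩
      · rw [if_neg hab] at h
        simp at h

lemma cp_full (X Y : List Int) (hlen : X.length = Y.length) (h : cp X Y = X.length) : X = Y := by
  induction X generalizing Y with
  | nil => simpa using (List.length_eq_zero_iff.mp hlen.symm)
  | cons a X' ih =>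
    cases Y with
    | nil => simp at hlen
    | cons b Y' =>
      rw [cp] at h
      by_cases hab : a = b
      · rw [if_pos hab] at h
        simp at h hlen
        rw [hab, ih Y' hlen h]
      · rw [if_neg hab] at h
        simp at h

lemma cp_decomp : ∀ (X Y : List Int), cp X Y < X.length → cp X Y < Y.length →
    ∃ (P : List Int) (a b : Int) (X' Y' : List Int),
      X = P ++ a :: X' ∧ Y = P ++ b :: Y' ∧ a ≠ b ∧ P.length = cp X Y := by
  intro X
  induction X with
  | nil => intro Y h _; simp [cp] at h
  | cons a X' ih =>
    intro Y h1 h2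
    cases Y with
    | nil => simp [cp] at h2
    | cons b Y' =>
      by_cases hab : a = b
      · rw [cp, if_pos hab] at h1 h2 ⊢
        simp at h1 h2
        obtain ⟨P, c, d, U, V, hX, hY, hcd, hP⟩ := ih Y' h1 h2
        exact ⟨a :: P, c, d, U, V, by simp [hX], by simp [hab, hY], hcd, by simp [hP]⟩
      · rw [cp, if_neg hab] at *
        exact ⟨[], a, b, X', Y', rfl, rfl, hab, rfl⟩

lemma loopL_common_prefix : ∀ (P A B : List Int) (d : Int),
    loopL (P ++ A) (P ++ B) d = ((loopL A B d).1 + P.length, (loopL A B d).2) := by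
  intro P
  induction P with
  | nil => intro A B d; simp
  | cons p P' ih =>
    intro A B d
    rw [List.cons_append, List.cons_append, loopL, if_pos rfl, ih]
    simp
    omega

lemma loopL_fst_le_left : ∀ (X B : List Int) (d : Int), (loopL X B d).1 ≤ X.length := by
  intro X
  induction X with
  | nil => intro B d; simp [loopL]
  | cons a X' ih =>
    intro B d
    cases B with
    | nil => simp [loopL]
    | cons b B' =>
      rw [loopL]
      by_cases hab : a = b
      · rw [if_pos hab]; have := ih B' d; simp; omega
      · rw [if_neg hab]; have := ih (b :: B') a; simp; omega

lemma loopL_full_iff : ∀ (X B : List Int) (d : Int), X.length < B.length →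
    ((loopL X B d).1 = X.length ↔ X = B.take X.length)
    ∧ (X = B.take X.length → (loopL X B d).2 = d) := by
  intro X
  induction X with
  | nil => intro B d h; simp [loopL]
  | cons a X' ih =>
    intro B d h
    cases B with
    | nil => simp at h
    | cons b B' =>
      rw [loopL]
      by_cases hab : a = b
      · rw [if_pos hab]
        have hlt : X'.length < B'.length := by simp at h; omega
        obtain ⟨hiff, hd⟩ := ih B' d hlt
        constructor
        · simp only [List.length_cons, List.take_succ_cons]
          constructor
          · intro he
            have : (loopL X' B' d).1 = X'.length := by omega
            rw [hab]
            exact congrArg (List.cons b) (hiff.mp this)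
          · intro he
            simp [hab] at he ⊢
            rw [hiff.mpr he]
        · intro he
          simp only [List.length_cons, List.take_succ_cons] at he
          exact hd (by simpa [hab] using congrArg List.tail he)
      · rw [if_neg hab]
        constructor
        · constructor
          · intro he
            have := loopL_fst_le_left X' (b :: B') a
            simp at he; omega
          · intro he
            simp only [List.length_cons, List.take_succ_cons] at he
            exact absurd (List.head_eq_of_cons_eq he) hab
        · intro he
          simp only [List.length_cons, List.take_succ_cons] at he
          exact absurd (List.head_eq_of_cons_eq he) hab

-- the slice xs[i:-1] for a natural i
lemma slice_nat_neg_one (xs : List Int) (i : Nat) (h : i ≤ xs.length) :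
    PySem.List.slice xs (some (i : Int)) (some (-1)) = (xs.drop i).dropLast := by
  simp [PySem.List.slice, List.dropLast_eq_take, Nat.min_eq_left h]
  omega

-- per-direction equality: canReplace(s1, s2) with divergence decomposition
lemma canReplace_eq (P : List Int) (a b : Int) (X' Y' : List Int) (hab : a ≠ b)
    (hlen : X'.length = Y'.length) :
    pvCanReplace (P ++ a :: X') (P ++ b :: Y')
      = (decide (PySem.List.slice (P ++ a :: X') (some ((P.length : Int) + 1)) none
          = PySem.List.slice (P ++ b :: Y') (some (P.length : Int)) (some (-1)))
        && neGet (P ++ b :: Y') (P ++ a :: X') (P.length : Int)) := by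
  have hdrop1 : (P ++ a :: X').drop (P.length + 1) = X' := by
    rw [show P ++ a :: X' = (P ++ [a]) ++ X' from by simp,
      show P.length + 1 = (P ++ [a]).length from by simp, List.drop_left]
  have hslice1 : PySem.List.slice (P ++ a :: X') (some ((P.length : Int) + 1)) none = X' := by
    rw [show ((P.length : Int) + 1) = ((P.length + 1 : Nat) : Int) from by push_cast; ring,
      PySem.List.slice_from_natCast, hdrop1]
  have hslice2 : PySem.List.slice (P ++ b :: Y') (some (P.length : Int)) (some (-1))
      = (b :: Y').dropLast := by
    rw [slice_nat_neg_one _ _ (by simp), List.drop_left]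
  have hget : PySem.List.pyGet? (P ++ a :: X') (P.length : Int) = some a :=
    PySem.List.pyGet?_append_length P X' a
  have hne : neGet (P ++ b :: Y') (P ++ a :: X') (P.length : Int) = lastNe (P ++ b :: Y') a := by
    unfold neGet lastNe
    rw [hget]
    cases PySem.List.pyGet? (P ++ b :: Y') (-1) <;> rfl
  have hloop := pvLoop_eq_loopL (P ++ a :: X') (P ++ b :: Y') (P ++ a :: X').length 0 0 (-1)
    (by omega) (by omega) (by omega)
  simp only [List.drop_zero, Nat.zero_add] at hloop
  have hstep : loopL (a :: X') (b :: Y') (-1) = loopL X' (b :: Y') a := by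
    rw [loopL, if_neg hab]
  obtain ⟨hiff, hd⟩ := loopL_full_iff X' (b :: Y') a (by simp [hlen])
  have hle := loopL_fst_le_left X' (b :: Y') a
  have hdlast : (b :: Y').dropLast = (b :: Y').take X'.length := by
    rw [List.dropLast_eq_take]
    simp [hlen]
  simp only [pvCanReplace]
  rw [hloop, loopL_common_prefix, hstep, hslice1, hslice2, hdlast, hne]
  by_cases hfull : X' = (b :: Y').take X'.length
  · have h1 : (loopL X' (b :: Y') a).1 = X'.length := hiff.mpr hfull
    have h2 : (loopL X' (b :: Y') a).2 = a := hd hfull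
    rw [h1, h2, if_pos (by simp only [List.length_append, List.length_cons]; push_cast; omega)]
    rw [decide_eq_true hfull, Bool.true_and]
  · have h1 : (loopL X' (b :: Y') a).1 ≠ X'.length := fun h => hfull (hiff.mp h)
    rw [if_neg (by simp only [List.length_append, List.length_cons]; push_cast; omega)]
    rw [decide_eq_false hfull, Bool.false_and]

lemma loopL_take_sublist : ∀ (A B : List Int) (d : Int), (B.take (loopL A B d).1).Sublist A := by
  intro A
  induction A with
  | nil => intro B d; simp [loopL]
  | cons a A' ih =>
    intro B d
    cases B with
    | nil => simp [loopL]
    | cons b B' =>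
      rw [loopL]
      by_cases hab : a = b
      · rw [if_pos hab]
        rw [List.take_succ_cons]
        subst hab
        exact (ih B' d).cons₂ a
      · rw [if_neg hab]
        exact (ih (b :: B') a).cons a

-- A's per-direction check is False whenever B-minus-last does not embed in A
lemma canReplace_false (A B : List Int) (hB : ¬ B.dropLast.Sublist A) :
    pvCanReplace A B = false := by
  have hloop := pvLoop_eq_loopL A B A.length 0 0 (-1) (by omega) (by omega) (by omega)
  simp only [List.drop_zero, Nat.zero_add] at hloop
  simp only [pvCanReplace]
  rw [hloop]
  have hcond : ¬ (((loopL A B (-1)).1 : Nat) : Int) = (B.length : Int) - 1 := by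
    intro hc
    have hj : (loopL A B (-1)).1 = B.length - 1 := by omega
    apply hB
    have htake := loopL_take_sublist A B (-1)
    rw [hj] at htake
    rwa [List.dropLast_eq_take]
  rw [if_neg hcond]

-- B's loop from 0 computes the common-prefix length
lemma bLoop_zero (s1 s2 : List Int) : bLoop s1 s2 0 = cp s1 s2 := by
  have := bLoop_eq_cp s1 s2 s1.length 0 (by omega) (by omega)
  simpa using this

-- A on two identical readings: both directions are False
lemma canReplace_self (s : List Int) : pvCanReplace s s = false := by
  have hloop := pvLoop_eq_loopL s s s.length 0 0 (-1) (by omega) (by omega) (by omega)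
  simp only [List.drop_zero, Nat.zero_add] at hloop
  have hself : loopL s s (-1) = (s.length, -1) := by
    have := loopL_common_prefix s [] [] (-1)
    simpa [loopL] using this
  simp only [pvCanReplace]
  rw [hloop, hself, if_neg (by simp; omega)]

-- lengths of the two slices B compares (for the unequal-length case)
lemma slice_len_from (xs : List Int) (i : Nat) :
    (PySem.List.slice xs (some ((i : Int) + 1)) none).length = xs.length - (i + 1) := by
  rw [show ((i : Int) + 1) = ((i + 1 : Nat) : Int) from by push_cast; ring,
    PySem.List.slice_from_natCast]
  simp

lemma slice_len_mid (xs : List Int) (i : Nat) (h : i ≤ xs.length) :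
    (PySem.List.slice xs (some (i : Int)) (some (-1))).length = xs.length - i - 1 := by
  rw [slice_nat_neg_one xs i h]
  simp

-- ===== VERDICT (by name: the statement is the Claim_ definition above) =====
theorem badSensor_spec : Claim_equal_badSensor := by
  intro s1 s2 _ hpre
  unfold Spec_badSensor
  simp only [badSensor_alt, bLoop_zero s1 s2]
  by_cases hlen : s1.length = s2.length
  · -- equal-length arrays: divergence decomposition
    by_cases hfull : cp s1 s2 = s1.length
    · have heq : s1 = s2 := cp_full s1 s2 hlen hfull
      rw [if_pos hfull]
      subst heq
      simp only [badSensor, canReplace_self]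
      rfl
    · have hlt1 : cp s1 s2 < s1.length := lt_of_le_of_ne (cp_le_left s1 s2) hfull
      have hlt2 : cp s1 s2 < s2.length := by omega
      obtain ⟨P, a, b, X', Y', hX, hY, hab, hP⟩ := cp_decomp s1 s2 hlt1 hlt2
      have hXY : X'.length = Y'.length := by
        rw [hX, hY] at hlen
        simp at hlen
        omega
      rw [if_neg hfull]
      have h2 : pvCanReplace s1 s2
          = (decide (PySem.List.slice s1 (some ((cp s1 s2 : Int) + 1)) none
              = PySem.List.slice s2 (some (cp s1 s2 : Int)) (some (-1)))
            && neGet s2 s1 (cp s1 s2 : Int)) := by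
        rw [← hP, hX, hY]
        exact canReplace_eq P a b X' Y' hab hXY
      have h1 : pvCanReplace s2 s1
          = (decide (PySem.List.slice s2 (some ((cp s1 s2 : Int) + 1)) none
              = PySem.List.slice s1 (some (cp s1 s2 : Int)) (some (-1)))
            && neGet s1 s2 (cp s1 s2 : Int)) := by
        rw [← hP, hX, hY]
        exact canReplace_eq P b a Y' X' (fun h => hab h.symm) hXY.symm
      simp only [badSensor, h1, h2]
      cases hone : (decide (PySem.List.slice s2 (some ((cp s1 s2 : Int) + 1)) none
          = PySem.List.slice s1 (some (cp s1 s2 : Int)) (some (-1)))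
        && neGet s1 s2 (cp s1 s2 : Int)) <;>
      cases htwo : (decide (PySem.List.slice s1 (some ((cp s1 s2 : Int) + 1)) none
          = PySem.List.slice s2 (some (cp s1 s2 : Int)) (some (-1)))
        && neGet s2 s1 (cp s1 s2 : Int)) <;> rfl
  · -- unequal lengths inside Pre_: neither dropLast embeds, both programs return -1
    have hW : ¬ s1.dropLast.Sublist s2 ∧ ¬ s2.dropLast.Sublist s1 := by
      rcases hpre with h | h
      · exact absurd h hlen
      · exact h
    have hA : badSensor s1 s2 = -1 := by
      simp only [badSensor, canReplace_false s2 s1 hW.1, canReplace_false s1 s2 hW.2]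
      rfl
    rw [hA]
    have hle2 : cp s1 s2 ≤ s2.length := cp_le_right s1 s2
    by_cases hfull : cp s1 s2 = s1.length
    · rw [if_pos hfull]
    · have hlt1 : cp s1 s2 < s1.length := lt_of_le_of_ne (cp_le_left s1 s2) hfull
      have hlt2 : cp s1 s2 < s2.length := by
        rcases lt_or_eq_of_le hle2 with h | h
        · exact h
        · exfalso
          apply hW.2
          rw [cp_eq_right s1 s2 h]
          exact (List.dropLast_sublist _).trans (List.take_sublist _ _)
      rw [if_neg hfull]
      have d1 : decide (PySem.List.slice s2 (some ((cp s1 s2 : Int) + 1)) none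
          = PySem.List.slice s1 (some (cp s1 s2 : Int)) (some (-1))) = false := by
        apply decide_eq_false
        intro he
        have := congrArg List.length he
        rw [slice_len_from s2 (cp s1 s2), slice_len_mid s1 (cp s1 s2) (by omega)] at this
        omega
      have d2 : decide (PySem.List.slice s1 (some ((cp s1 s2 : Int) + 1)) none
          = PySem.List.slice s2 (some (cp s1 s2 : Int)) (some (-1))) = false := by
        apply decide_eq_false
        intro he
        have := congrArg List.length he
        rw [slice_len_from s1 (cp s1 s2), slice_len_mid s2 (cp s1 s2) (by omega)] at this
        omega
      rw [d1, d2, Bool.false_and, Bool.false_and]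
      rfl
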